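-- pv_equiv track=rewrite | github.com/SteamCastle/hacs_tts_stt_proxy | custom_components/tts_stt_proxy/coordinator.py | _get_next_service
-- ===== SOURCE A (Python) =====
-- from typing import List, Optional, Dict
--
-- def _get_next_service(services: List[Dict]) -> Optional[str]:
--     sorted_services = sorted(
--         [s for s in services if s.get("enabled", False)],
--         key=lambda s: s.get("priority", 99)
--     )
--     if not sorted_services:
--         return None
--     return sorted_services[0]["entity_id"]
-- ===== SOURCE B (Python) =====
-- from typing import List, Optional, Dict
--
-- def _get_next_service(services: List[Dict]) -> Optional[str]:
--     # One pass: keep the (priority, service) with the smallest priority;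
--     # strict '<' keeps the earliest service on ties, like the stable sort.
--     best = None
--     for s in services:
--         if not s.get("enabled", False):
--             continue
--         p = s.get("priority", 99)
--         if best is None or p < best[0]:
--             best = (p, s)
--     if best is None:
--         return None
--     return best[1]["entity_id"]
-- ===== Notes on version B (the rewrite author's own statement) =====
-- stated objective: simpler
-- what changed: Replaces build-a-filtered-list-then-sort-then-take-head by a single pass that tracks the first enabled service with the strictly smallest priority (strict < preserves the stable sort's tie-breaking).
import Mathlib
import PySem

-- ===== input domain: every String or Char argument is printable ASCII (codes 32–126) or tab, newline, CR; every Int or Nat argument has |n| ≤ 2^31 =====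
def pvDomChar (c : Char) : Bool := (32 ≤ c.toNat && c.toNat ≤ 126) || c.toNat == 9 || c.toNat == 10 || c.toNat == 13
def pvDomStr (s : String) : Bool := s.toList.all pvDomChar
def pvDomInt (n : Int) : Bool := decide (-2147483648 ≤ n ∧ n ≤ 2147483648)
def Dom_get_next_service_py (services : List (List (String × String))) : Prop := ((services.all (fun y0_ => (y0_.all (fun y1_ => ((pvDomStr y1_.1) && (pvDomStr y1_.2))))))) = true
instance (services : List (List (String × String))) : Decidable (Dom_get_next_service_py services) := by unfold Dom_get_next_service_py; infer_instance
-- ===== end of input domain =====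

-- B replaces filter+stable-sort+head by a single pass tracking the first enabled
-- service with strictly smallest priority; equivalence of the return values is proved below.


-- s.get(k, d) on an association-list dict (first match, default d)
def pvGetD (s : List (String × String)) (k d : String) : String :=
  (List.lookup k s).getD d

-- s.get("enabled", False) is truthy iff the key is present with a nonempty string
def pvEnabled (s : List (String × String)) : Bool :=
  !(pvGetD s "enabled" "" == "")

-- s.get("priority", 99): the int default 99 is encoded as the string "99".  This is exact
-- under Pre_ (priority keys homogeneous among enabled services): defaults are then only
-- ever compared with each other, where 99 = 99 and "99" = "99" alike.
def pvPrio (s : List (String × String)) : String :=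
  pvGetD s "priority" "99"

-- ===== PORT A =====
def get_next_service_py (services : List (List (String × String))) : Option String :=
  let sorted_services :=
    PySem.List.sorted (services.filter (fun s => pvEnabled s)) (fun s => pvPrio s)
  match sorted_services with
  | [] => none
  | s :: _ => List.lookup "entity_id" s   -- s["entity_id"]; none exactly where Python raises KeyError

-- ===== PORT B =====
-- the body of Source B's loop: update best when the priority is strictly smaller
def pvStep (best : Option (String × List (String × String))) (s : List (String × String)) :
    Option (String × List (String × String)) :=
  let p := pvPrio s
  match best with
  | none => some (p, s)
  | some (q, t) => if p < q then some (p, s) else some (q, t)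

def get_next_service_py_alt (services : List (List (String × String))) : Option String :=
  let best := services.foldl (fun best s => if !(pvEnabled s) then best else pvStep best s) none
  match best with
  | none => none
  | some (_, t) => List.lookup "entity_id" t   -- best[1]["entity_id"]; none exactly where Python raises KeyError

-- ===== PRECONDITION & SPEC =====
-- Pre_ excludes exactly the inputs where Python A raises: a TypeError when the enabled
-- services mix present "priority" strings with the absent-key int default 99, and a
-- KeyError when a winning enabled service lacks "entity_id".  The "entity_id" clause is
-- required of EVERY enabled service, slightly narrower than the crash set (see cites):
-- on the excluded returning inputs A and B agree anyway.
def Pre_get_next_service_py (services : List (List (String × String))) : Prop :=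
  ((∀ s ∈ services.filter (fun s => pvEnabled s), (List.lookup "priority" s).isSome) ∨
   (∀ s ∈ services.filter (fun s => pvEnabled s), List.lookup "priority" s = none)) ∧
  (∀ s ∈ services.filter (fun s => pvEnabled s), (List.lookup "entity_id" s).isSome)
instance (services : List (List (String × String))) : Decidable (Pre_get_next_service_py services) := by
  unfold Pre_get_next_service_py; infer_instance

def pvWitness_get_next_service_py : (List (List (String × String))) :=
  [[("enabled", "1"), ("priority", "2"), ("entity_id", "tts.a")],
   [("enabled", "1"), ("priority", "1"), ("entity_id", "tts.b")],
   [("enabled", "")]]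

def Spec_get_next_service_py (services : List (List (String × String))) (out : Option String) : Prop := out = get_next_service_py_alt services
instance (services : List (List (String × String))) (out : Option String) : Decidable (Spec_get_next_service_py services out) := by unfold Spec_get_next_service_py; infer_instance

-- ===== CLAIM (what is proved, stated in full; the proofs are below) =====
def Claim_equal_get_next_service_py : Prop := ∀ (services : List (List (String × String))), Dom_get_next_service_py services → Pre_get_next_service_py services → Spec_get_next_service_py services (get_next_service_py services)

-- ===== LEMMAS AND PROOFS =====

-- Invariant tying the stable insertion sort's accumulator to B's running best:
-- the head of the sorted accumulator is exactly the tracked (priority, element).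
def pvRel (acc : List (List (String × String)))
    (b : Option (String × List (String × String))) : Prop :=
  match acc with
  | [] => b = none
  | h :: _ => b = some (pvPrio h, h)

theorem pvRel_step (x : List (String × String)) (acc : List (List (String × String)))
    (b : Option (String × List (String × String))) (h : pvRel acc b) :
    pvRel (PySem.List.insertBy (fun a b => decide (pvPrio a < pvPrio b)) x acc) (pvStep b x) := by
  cases acc with
  | nil =>
    unfold pvRel at h
    subst h
    simp only [PySem.List.insertBy, pvStep, pvRel]
  | cons hd tl =>
    unfold pvRel at h
    subst h
    by_cases hc : pvPrio x < pvPrio hd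
    · simp only [PySem.List.insertBy, pvStep, pvRel, hc, decide_true, if_pos]
    · simp only [PySem.List.insertBy, pvStep, pvRel, hc, decide_false, if_neg, Bool.false_eq_true,
        not_false_eq_true]

theorem pvRel_loop (l : List (List (String × String))) :
    ∀ (acc : List (List (String × String))) (b : Option (String × List (String × String))),
    pvRel acc b →
    pvRel
      (l.foldl (fun acc x => PySem.List.insertBy (fun a b => decide (pvPrio a < pvPrio b)) x acc) acc)
      (l.foldl pvStep b) := by
  induction l with
  | nil => intro acc b h; exact h
  | cons x xs ih =>
    intro acc b h
    exact ih _ _ (pvRel_step x acc b h)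

-- B's loop over all services equals the same loop over the enabled-filtered list.
theorem pvFoldl_filter_enabled (l : List (List (String × String))) :
    ∀ b, l.foldl (fun b s => if !(pvEnabled s) then b else pvStep b s) b
      = (l.filter (fun s => pvEnabled s)).foldl pvStep b := by
  induction l with
  | nil => intro b; rfl
  | cons s t ih =>
    intro b
    by_cases hs : pvEnabled s
    · simp only [List.foldl_cons, List.filter_cons, hs, Bool.not_true, Bool.false_eq_true,
        if_false, if_pos]
      exact ih _
    · simp only [List.foldl_cons, List.filter_cons, hs, Bool.not_false, Bool.false_eq_true,
        if_true]
      exact ih _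

-- ===== VERDICT (by name: the statement is the Claim_ definition above) =====
theorem get_next_service_py_spec : Claim_equal_get_next_service_py := by
  intro services _dom _pre
  unfold Spec_get_next_service_py get_next_service_py get_next_service_py_alt
  rw [pvFoldl_filter_enabled]
  have h := pvRel_loop (services.filter (fun s => pvEnabled s)) [] none rfl
  rw [PySem.List.sorted_eq_foldl_insertBy]
  cases hcase : (services.filter (fun s => pvEnabled s)).foldl
      (fun acc x => PySem.List.insertBy (fun a b => decide (pvPrio a < pvPrio b)) x acc) [] with
  | nil => rw [hcase] at h; unfold pvRel at h; rw [h]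
  | cons hd tl => rw [hcase] at h; unfold pvRel at h; rw [h]
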